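-- pv_equiv track=rewrite | github.com/Lucasgvdii/Take-The-Challenge | solutions_code/broken_pool_race.py | broken_pool_race
-- ===== SOURCE A (Python) =====
-- def broken_pool_race(our_pool,neighbour_pool):
--
--     if our_pool[1]<our_pool[2]:
--         if neighbour_pool[1]<neighbour_pool[2]:
--             return "Impossible to fill"
--
--     our_filling_target=our_pool[0]
--     our_travel_balance=our_pool[1]-our_pool[2]
--
--     neighbour_filling_target=neighbour_pool[0]
--     neighbour_travel_balance=neighbour_pool[1]-neighbour_pool[2]
--
--     our_current_filling=our_pool[1]
--     neighbour_current_filling=neighbour_pool[1]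
--
--     trips=1
--
--     while our_current_filling<our_filling_target and neighbour_current_filling<neighbour_filling_target:
--         our_current_filling=our_current_filling+our_travel_balance
--         neighbour_current_filling=neighbour_current_filling+neighbour_travel_balance
--         trips=trips+1
--
--     if our_current_filling>=our_filling_target:
--         if neighbour_current_filling>=neighbour_filling_target:
--             return "Tie "+str(trips)
--         return "We win "+str(trips)
--     return "Neighbour wins "+str(trips)
-- ===== SOURCE B (Python) =====
-- def broken_pool_race(our_pool, neighbour_pool):
--     if our_pool[1] < our_pool[2] and neighbour_pool[1] < neighbour_pool[2]:
--         return "Impossible to fill"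
--     def trips_needed(pool):
--         target, first, leak = pool[0], pool[1], pool[2]
--         if first >= target:
--             return 1
--         net = first - leak
--         if net <= 0:
--             return None
--         # ceiling division: extra trips after the first delivery
--         return 1 + (-((first - target) // net))
--     ours = trips_needed(our_pool)
--     theirs = trips_needed(neighbour_pool)
--     if ours is None and theirs is None:
--         return "Impossible to fill"
--     if theirs is None or (ours is not None and ours < theirs):
--         return "We win " + str(ours)
--     if ours is None or theirs < ours:
--         return "Neighbour wins " + str(theirs)
--     return "Tie " + str(ours)
-- ===== Notes on version B (the rewrite author's own statement) =====
-- stated objective: alternative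
-- what changed: Replaces the trip-by-trip simulation loop with a closed-form ceiling-division count of trips needed by each pool, then compares the two counts.
import Mathlib
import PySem

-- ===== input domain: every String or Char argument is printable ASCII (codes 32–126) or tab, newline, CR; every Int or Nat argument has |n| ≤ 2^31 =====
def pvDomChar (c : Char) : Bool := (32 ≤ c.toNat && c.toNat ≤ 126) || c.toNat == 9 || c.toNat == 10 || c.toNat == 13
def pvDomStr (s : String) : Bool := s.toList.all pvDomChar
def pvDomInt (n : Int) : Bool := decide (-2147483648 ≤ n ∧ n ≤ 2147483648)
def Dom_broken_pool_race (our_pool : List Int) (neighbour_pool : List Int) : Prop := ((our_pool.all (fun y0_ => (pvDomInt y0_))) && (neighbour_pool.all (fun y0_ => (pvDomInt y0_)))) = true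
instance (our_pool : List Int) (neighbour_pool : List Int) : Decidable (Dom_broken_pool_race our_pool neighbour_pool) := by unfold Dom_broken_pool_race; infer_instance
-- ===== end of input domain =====

-- B replaces A's trip-by-trip simulation with a closed-form ceiling-division trip count
-- per pool (keeping A's both-pools-leak "Impossible" guard), compared directly.

-- ===== PORT A =====
-- the while loop; fuel only makes the recursion total, it is large enough on every input
-- satisfying Pre_ (outside Pre_ the Python loop diverges and nothing is claimed)
def pool_loop (t1 b1 t2 b2 : Int) (fuel : Nat) (c1 c2 tr : Int) : Int × Int × Int :=
  if c1 < t1 ∧ c2 < t2 then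
    match fuel with
    | 0 => (c1, c2, tr)
    | f + 1 => pool_loop t1 b1 t2 b2 f (c1 + b1) (c2 + b2) (tr + 1)
  else (c1, c2, tr)

def broken_pool_race (our_pool : List Int) (neighbour_pool : List Int) : String :=
  -- list indexing: Pre_ guarantees length ≥ 3, so pyGet? is some; getD 0 is never used
  let og := (PySem.List.pyGet? our_pool 1).getD 0
  let ol := (PySem.List.pyGet? our_pool 2).getD 0
  let ng := (PySem.List.pyGet? neighbour_pool 1).getD 0
  let nl := (PySem.List.pyGet? neighbour_pool 2).getD 0
  if og < ol ∧ ng < nl then "Impossible to fill"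
  else
    let t1 := (PySem.List.pyGet? our_pool 0).getD 0
    let b1 := og - ol
    let t2 := (PySem.List.pyGet? neighbour_pool 0).getD 0
    let b2 := ng - nl
    let st := pool_loop t1 b1 t2 b2 ((t1 - og).toNat + (t2 - ng).toNat + 1) og ng 1
    if st.1 ≥ t1 then
      if st.2.1 ≥ t2 then "Tie " ++ PySem.Int.toStr st.2.2
      else "We win " ++ PySem.Int.toStr st.2.2
    else "Neighbour wins " ++ PySem.Int.toStr st.2.2

-- ===== PORT B =====
def trips_needed (pool : List Int) : Option Int :=
  let target := (PySem.List.pyGet? pool 0).getD 0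
  let first := (PySem.List.pyGet? pool 1).getD 0
  let leak := (PySem.List.pyGet? pool 2).getD 0
  if first ≥ target then some 1
  else
    let net := first - leak
    if net ≤ 0 then none
    else some (1 + (-(PySem.Int.floordiv (first - target) net)))

def broken_pool_race_alt (our_pool : List Int) (neighbour_pool : List Int) : String :=
  if (PySem.List.pyGet? our_pool 1).getD 0 < (PySem.List.pyGet? our_pool 2).getD 0 ∧
     (PySem.List.pyGet? neighbour_pool 1).getD 0 < (PySem.List.pyGet? neighbour_pool 2).getD 0 then
    "Impossible to fill"
  else
  match trips_needed our_pool, trips_needed neighbour_pool with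
  | none, none => "Impossible to fill"
  | some o, none => "We win " ++ PySem.Int.toStr o
  | none, some t => "Neighbour wins " ++ PySem.Int.toStr t
  | some o, some t =>
    if o < t then "We win " ++ PySem.Int.toStr o
    else if t < o then "Neighbour wins " ++ PySem.Int.toStr t
    else "Tie " ++ PySem.Int.toStr o

-- ===== PRECONDITION & SPEC =====
-- Pre_ excludes lists shorter than 3 (A raises IndexError) and the inputs on which A's while
-- loop never terminates (both pools below target, neither pool gains per trip, but not both
-- strictly leaking — then A's early "Impossible" guard does not fire and the loop diverges).
def Pre_broken_pool_race (our_pool : List Int) (neighbour_pool : List Int) : Prop :=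
  3 ≤ our_pool.length ∧ 3 ≤ neighbour_pool.length ∧
  ¬ (our_pool.getD 1 0 < our_pool.getD 0 0 ∧ neighbour_pool.getD 1 0 < neighbour_pool.getD 0 0 ∧
     our_pool.getD 1 0 - our_pool.getD 2 0 ≤ 0 ∧ neighbour_pool.getD 1 0 - neighbour_pool.getD 2 0 ≤ 0 ∧
     ¬ (our_pool.getD 1 0 - our_pool.getD 2 0 < 0 ∧ neighbour_pool.getD 1 0 - neighbour_pool.getD 2 0 < 0))
instance (our_pool : List Int) (neighbour_pool : List Int) : Decidable (Pre_broken_pool_race our_pool neighbour_pool) := by unfold Pre_broken_pool_race; infer_instance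

def pvWitness_broken_pool_race : List Int × List Int := ([10, 3, 1], [10, 2, 1])

def Spec_broken_pool_race (our_pool : List Int) (neighbour_pool : List Int) (out : String) : Prop := out = broken_pool_race_alt our_pool neighbour_pool
instance (our_pool : List Int) (neighbour_pool : List Int) (out : String) : Decidable (Spec_broken_pool_race our_pool neighbour_pool out) := by unfold Spec_broken_pool_race; infer_instance

-- ===== CLAIM (what is proved, stated in full; the proofs are below) =====
def Claim_equal_broken_pool_race : Prop := ∀ (our_pool : List Int) (neighbour_pool : List Int), Dom_broken_pool_race our_pool neighbour_pool → Pre_broken_pool_race our_pool neighbour_pool → Spec_broken_pool_race our_pool neighbour_pool (broken_pool_race our_pool neighbour_pool)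

-- ===== LEMMAS AND PROOFS =====

theorem pool_loop_step (t1 b1 t2 b2 : Int) (f : Nat) (c1 c2 tr : Int)
    (h : c1 < t1 ∧ c2 < t2) :
    pool_loop t1 b1 t2 b2 (f + 1) c1 c2 tr = pool_loop t1 b1 t2 b2 f (c1 + b1) (c2 + b2) (tr + 1) := by
  conv_lhs => rw [pool_loop.eq_def]
  rw [if_pos h]

theorem pool_loop_stop (t1 b1 t2 b2 : Int) (f : Nat) (c1 c2 tr : Int)
    (h : ¬ (c1 < t1 ∧ c2 < t2)) :
    pool_loop t1 b1 t2 b2 f c1 c2 tr = (c1, c2, tr) := by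
  conv_lhs => rw [pool_loop.eq_def]
  rw [if_neg h]

theorem pool_loop_spec (t1 b1 t2 b2 : Int) :
    ∀ (m f : Nat) (c1 c2 tr : Int), m ≤ f →
    (∀ j : Nat, j < m → c1 + (j : Int) * b1 < t1 ∧ c2 + (j : Int) * b2 < t2) →
    ¬ (c1 + (m : Int) * b1 < t1 ∧ c2 + (m : Int) * b2 < t2) →
    pool_loop t1 b1 t2 b2 f c1 c2 tr = (c1 + (m : Int) * b1, c2 + (m : Int) * b2, tr + (m : Int)) := by
  intro m
  induction m with
  | zero =>
    intro f c1 c2 tr _ _ hstop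
    push_cast at hstop
    simp only [zero_mul, add_zero] at hstop
    rw [pool_loop_stop t1 b1 t2 b2 f c1 c2 tr hstop]
    norm_num
  | succ k ih =>
    intro f c1 c2 tr hmf hbelow hstop
    obtain ⟨f', rfl⟩ : ∃ f', f = f' + 1 := ⟨f - 1, by omega⟩
    have h0 := hbelow 0 (by omega)
    simp at h0
    rw [pool_loop_step t1 b1 t2 b2 f' c1 c2 tr h0]
    have := ih f' (c1 + b1) (c2 + b2) (tr + 1) (by omega)
      (fun j hj => by
        have := hbelow (j + 1) (by omega)
        push_cast at this ⊢
        constructor <;> [linarith [this.1]; linarith [this.2]])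
      (by
        push_cast at hstop ⊢
        intro hc
        exact hstop ⟨by linarith [hc.1], by linarith [hc.2]⟩)
    rw [this]
    push_cast
    simp only [Prod.mk.injEq]
    refine ⟨by ring, by ring, by ring⟩

theorem trips_needed_cons (t g l : Int) (r : List Int) :
    trips_needed (t :: g :: l :: r) =
      if g ≥ t then some 1
      else if g - l ≤ 0 then none
      else some (1 + (-(PySem.Int.floordiv (g - t) (g - l)))) := by
  have c1 : (0:Int) ≤ (r.length:Int) + 1 + 1 := by positivity
  have c2 : (0:Int) ≤ (r.length:Int) + 1 := by positivity
  have c3 : (2:Int) ≤ (r.length:Int) + 1 + 1 := by omega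
  simp [trips_needed, PySem.List.pyGet?, PySem.List.pyIdx?, c1, c2, c3]

theorem broken_pool_race_alt_cons (t1 g1 l1 t2 g2 l2 : Int) (r1 r2 : List Int) :
    broken_pool_race_alt (t1 :: g1 :: l1 :: r1) (t2 :: g2 :: l2 :: r2) =
      if g1 < l1 ∧ g2 < l2 then "Impossible to fill"
      else
        match trips_needed (t1 :: g1 :: l1 :: r1), trips_needed (t2 :: g2 :: l2 :: r2) with
        | none, none => "Impossible to fill"
        | some o, none => "We win " ++ PySem.Int.toStr o
        | none, some t => "Neighbour wins " ++ PySem.Int.toStr t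
        | some o, some t =>
          if o < t then "We win " ++ PySem.Int.toStr o
          else if t < o then "Neighbour wins " ++ PySem.Int.toStr t
          else "Tie " ++ PySem.Int.toStr o := by
  have c2 : (0:Int) ≤ (r1.length:Int) + 1 := by positivity
  have c3 : (2:Int) ≤ (r1.length:Int) + 1 + 1 := by omega
  have d2 : (0:Int) ≤ (r2.length:Int) + 1 := by positivity
  have d3 : (2:Int) ≤ (r2.length:Int) + 1 + 1 := by omega
  simp only [broken_pool_race_alt, PySem.List.pyGet?, PySem.List.pyIdx?]
  norm_num [c2, c3, d2, d3]
  rfl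

theorem broken_pool_race_cons (t1 g1 l1 t2 g2 l2 : Int) (r1 r2 : List Int) :
    broken_pool_race (t1 :: g1 :: l1 :: r1) (t2 :: g2 :: l2 :: r2) =
      if g1 < l1 ∧ g2 < l2 then "Impossible to fill"
      else
        let st := pool_loop t1 (g1 - l1) t2 (g2 - l2) ((t1 - g1).toNat + (t2 - g2).toNat + 1) g1 g2 1
        if st.1 ≥ t1 then
          if st.2.1 ≥ t2 then "Tie " ++ PySem.Int.toStr st.2.2
          else "We win " ++ PySem.Int.toStr st.2.2
        else "Neighbour wins " ++ PySem.Int.toStr st.2.2 := by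
  have c1 : (0:Int) ≤ (r1.length:Int) + 1 + 1 := by positivity
  have c2 : (0:Int) ≤ (r1.length:Int) + 1 := by positivity
  have c3 : (2:Int) ≤ (r1.length:Int) + 1 + 1 := by omega
  have d1 : (0:Int) ≤ (r2.length:Int) + 1 + 1 := by positivity
  have d2 : (0:Int) ≤ (r2.length:Int) + 1 := by positivity
  have d3 : (2:Int) ≤ (r2.length:Int) + 1 + 1 := by omega
  simp [broken_pool_race, PySem.List.pyGet?, PySem.List.pyIdx?, c1, c2, c3, d1, d2, d3]

-- ceiling characterisation: if the pool first falls below target for j < M trips and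
-- reaches it at trip 1 + M, B's closed form gives exactly 1 + M
theorem reach_trips (t g l : Int) (r : List Int) (M : Nat)
    (hbel : ∀ j : Nat, j < M → g + (j : Int) * (g - l) < t)
    (hreach : t ≤ g + (M : Int) * (g - l)) :
    trips_needed (t :: g :: l :: r) = some (1 + (M : Int)) := by
  rw [trips_needed_cons]
  cases M with
  | zero =>
    simp at hreach
    simp [hreach]
  | succ k =>
    have hg : g < t := by simpa using hbel 0 (by omega)
    have hnet : 0 < g - l := by nlinarith [hreach, hg]
    rw [if_neg (by omega), if_neg (by omega)]
    have hceil : -(PySem.Int.floordiv (g - t) (g - l)) = ((k + 1 : Nat) : Int) := by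
      have := (PySem.Int.neg_floordiv_neg_eq_iff_of_pos (a := t - g) (b := g - l)
        (q := ((k + 1 : Nat) : Int)) hnet)
      rw [show -(t - g) = g - t by ring] at this
      refine this.mpr ⟨?_, ?_⟩
      · have := hbel k (by omega)
        push_cast at this ⊢
        nlinarith
      · push_cast at hreach ⊢
        nlinarith
    rw [hceil]

-- if the pool is still below target through trip 1 + M, B's count is none or larger
theorem noreach_trips (t g l : Int) (r : List Int) (M : Nat)
    (hbel : ∀ j : Nat, j ≤ M → g + (j : Int) * (g - l) < t) :
    trips_needed (t :: g :: l :: r) = none ∨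
      ∃ n, trips_needed (t :: g :: l :: r) = some n ∧ (1 + (M : Int)) < n := by
  have hg : g < t := by simpa using hbel 0 (by omega)
  rw [trips_needed_cons, if_neg (by omega)]
  by_cases hnet : g - l ≤ 0
  · left; rw [if_pos hnet]
  · right
    rw [not_le] at hnet
    rw [if_neg (by omega)]
    refine ⟨_, rfl, ?_⟩
    set c := -(PySem.Int.floordiv (g - t) (g - l)) with hc
    have hchar := (PySem.Int.neg_floordiv_neg_eq_iff_of_pos (a := t - g) (b := g - l)
      (q := c) hnet)
    rw [show -(t - g) = g - t by ring] at hchar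
    obtain ⟨-, h2⟩ := hchar.mp rfl
    have hM := hbel M (le_refl M)
    have : (M : Int) * (g - l) < c * (g - l) := by nlinarith
    have : (M : Int) < c := lt_of_mul_lt_mul_right this (by omega)
    omega

theorem broken_pool_race_spec : Claim_equal_broken_pool_race := by
  intro our_pool neighbour_pool hdom hpre
  unfold Spec_broken_pool_race
  obtain ⟨h3a, h3b, hdiv⟩ := hpre
  rcases our_pool with _ | ⟨t1, our1⟩; · simp at h3a
  rcases our1 with _ | ⟨g1, our2⟩; · simp at h3a
  rcases our2 with _ | ⟨l1, r1⟩; · simp at h3a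
  rcases neighbour_pool with _ | ⟨t2, nb1⟩; · simp at h3b
  rcases nb1 with _ | ⟨g2, nb2⟩; · simp at h3b
  rcases nb2 with _ | ⟨l2, r2⟩; · simp at h3b
  simp only [List.getD_cons_succ, List.getD_cons_zero] at hdiv
  rw [broken_pool_race_cons]
  by_cases hguard : g1 < l1 ∧ g2 < l2
  · -- A's early "Impossible" guard; B has the same guard
    rw [if_pos hguard, broken_pool_race_alt_cons, if_pos hguard]
  · rw [if_neg hguard]
    -- the loop terminates: find the first trip count at which a pool is full
    have hexb : ∃ m : Nat, m ≤ (t1 - g1).toNat + (t2 - g2).toNat + 1 ∧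
        ¬ (g1 + (m : Int) * (g1 - l1) < t1 ∧ g2 + (m : Int) * (g2 - l2) < t2) := by
      by_cases h1 : t1 ≤ g1
      · exact ⟨0, by omega, by simp; omega⟩
      by_cases h2 : t2 ≤ g2
      · exact ⟨0, by omega, by simp; omega⟩
      have hpos : 0 < g1 - l1 ∨ 0 < g2 - l2 := by omega
      rcases hpos with hp1 | hp1
      · refine ⟨(t1 - g1).toNat, by omega, ?_⟩
        rw [not_and_or]; left; rw [not_lt]
        rw [Int.toNat_of_nonneg (by omega)]
        nlinarith
      · refine ⟨(t2 - g2).toNat, by omega, ?_⟩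
        rw [not_and_or]; right; rw [not_lt]
        rw [Int.toNat_of_nonneg (by omega)]
        nlinarith
    have hex : ∃ m : Nat, ¬ (g1 + (m : Int) * (g1 - l1) < t1 ∧ g2 + (m : Int) * (g2 - l2) < t2) := by
      obtain ⟨m, -, pm⟩ := hexb
      exact ⟨m, pm⟩
    have key : ∃ M : Nat, M ≤ (t1 - g1).toNat + (t2 - g2).toNat + 1 ∧
        ¬ (g1 + (M : Int) * (g1 - l1) < t1 ∧ g2 + (M : Int) * (g2 - l2) < t2) ∧
        ∀ j : Nat, j < M → g1 + (j : Int) * (g1 - l1) < t1 ∧ g2 + (j : Int) * (g2 - l2) < t2 := by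
      refine ⟨Nat.find hex, ?_, Nat.find_spec hex, ?_⟩
      · obtain ⟨m, hm, pm⟩ := hexb
        exact le_trans (Nat.find_le pm) hm
      · intro j hj
        have := Nat.find_min hex hj
        by_contra hcon
        exact this hcon
    obtain ⟨M, hMle, hstop, hbel⟩ := key
    rw [pool_loop_spec t1 (g1 - l1) t2 (g2 - l2) M _ g1 g2 1 hMle hbel hstop]
    simp only
    rw [broken_pool_race_alt_cons, if_neg hguard]
    by_cases hc1 : t1 ≤ g1 + (M : Int) * (g1 - l1)
    · have hours := reach_trips t1 g1 l1 r1 M (fun j hj => (hbel j hj).1) hc1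
      by_cases hc2 : t2 ≤ g2 + (M : Int) * (g2 - l2)
      · -- Tie
        have htheirs := reach_trips t2 g2 l2 r2 M (fun j hj => (hbel j hj).2) hc2
        rw [hours, htheirs]
        simp only
        rw [if_pos (by omega), if_pos (by omega), if_neg (by omega), if_neg (by omega)]
      · -- We win
        have htheirs := noreach_trips t2 g2 l2 r2 M (fun j hj => by
          rcases Nat.lt_or_ge j M with h | h
          · exact (hbel j h).2
          · have : j = M := by omega
            subst this; omega)
        rw [if_pos (by omega), if_neg (by omega)]
        rcases htheirs with hnone | ⟨n, hsome, hlt⟩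
        · rw [hours, hnone]
        · rw [hours, hsome]
          simp only
          rw [if_pos (by omega)]
    · -- Neighbour wins
      have hc2 : t2 ≤ g2 + (M : Int) * (g2 - l2) := by
        rcases not_and_or.mp hstop with h | h <;> omega
      have htheirs := reach_trips t2 g2 l2 r2 M (fun j hj => (hbel j hj).2) hc2
      have hours := noreach_trips t1 g1 l1 r1 M (fun j hj => by
        rcases Nat.lt_or_ge j M with h | h
        · exact (hbel j h).1
        · have : j = M := by omega
          subst this; omega)
      rw [if_neg (by omega)]
      rcases hours with hnone | ⟨n, hsome, hlt⟩
      · rw [htheirs, hnone]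
      · rw [htheirs, hsome]
        simp only
        rw [if_neg (by omega), if_pos (by omega)]
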